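-- pv_equiv track=rewrite | github.com/BryanTanady/ML-based-Cooling-System-FDD | fdd_system/broker/simulator.py | _resolve_columns
-- ===== SOURCE A (Python) =====
-- def _resolve_columns(fieldnames: list[str]) -> tuple[str | None, str | None, str | None]:
--     lowered = {name.strip().lower(): name for name in fieldnames}
--
--     def pick(*candidates: str) -> str | None:
--         for candidate in candidates:
--             if candidate in lowered:
--                 return lowered[candidate]
--         return None
--
--     x_col = pick("x", "acc_x", "ax")
--     y_col = pick("y", "acc_y", "ay")
--     z_col = pick("z", "acc_z", "az")
--     return x_col, y_col, z_col
-- ===== SOURCE B (Python) =====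
-- def _resolve_columns(fieldnames: list[str]) -> tuple[str | None, str | None, str | None]:
--     # Single pass: fold every fieldname into a per-axis (priority, name) accumulator.
--     groups = (("x", "acc_x", "ax"), ("y", "acc_y", "ay"), ("z", "acc_z", "az"))
--     best = [None, None, None]
--     for name in fieldnames:
--         key = name.strip().lower()
--         for axis, cands in enumerate(groups):
--             if key in cands:
--                 r = cands.index(key)
--                 if best[axis] is None or r <= best[axis][0]:
--                     best[axis] = (r, name)
--     return tuple(b[1] if b is not None else None for b in best)
-- ===== Notes on version B (the rewrite author's own statement) =====
-- stated objective: alternative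
-- what changed: Replaces A's build-a-lowered-dict-then-three-lookups strategy by one single pass over fieldnames that folds every name into a per-axis (candidate-priority, name) accumulator (better priority wins, last occurrence wins ties), so no dict and no per-candidate lookup phase exist.
import Mathlib
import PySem

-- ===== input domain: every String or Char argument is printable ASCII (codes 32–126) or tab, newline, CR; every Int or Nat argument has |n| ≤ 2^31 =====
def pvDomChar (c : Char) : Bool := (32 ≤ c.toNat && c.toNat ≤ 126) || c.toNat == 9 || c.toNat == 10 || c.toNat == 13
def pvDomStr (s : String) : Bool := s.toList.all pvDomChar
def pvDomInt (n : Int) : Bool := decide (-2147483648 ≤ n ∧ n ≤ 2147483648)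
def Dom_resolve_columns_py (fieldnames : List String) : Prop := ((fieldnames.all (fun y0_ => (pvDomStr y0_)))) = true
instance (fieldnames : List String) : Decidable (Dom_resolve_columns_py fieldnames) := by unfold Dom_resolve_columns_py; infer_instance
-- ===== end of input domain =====

-- B replaces A's lowered-key dict and three lookups by a single accumulating pass over fieldnames; objective: alternative.

-- ===== PORT A =====
-- lowered = {name.strip().lower(): name for name in fieldnames}
def pvLoweredA (fieldnames : List String) : PySem.Dict String String :=
  fieldnames.foldl (fun d name => d.insert (PySem.Str.lower (PySem.Str.strip name)) name) PySem.Dict.empty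

-- def pick(*candidates): for candidate in candidates: if candidate in lowered: return lowered[candidate]; return None
def pvPickA (lowered : PySem.Dict String String) : List String → Option String
  | [] => none
  | c :: rest => if lowered.contains c then lowered.get? c else pvPickA lowered rest

def resolve_columns_py (fieldnames : List String) : Option String × Option String × Option String :=
  let lowered := pvLoweredA fieldnames
  let x_col := pvPickA lowered ["x", "acc_x", "ax"]
  let y_col := pvPickA lowered ["y", "acc_y", "ay"]
  let z_col := pvPickA lowered ["z", "acc_z", "az"]
  (x_col, y_col, z_col)

-- ===== PORT B =====
-- key = name.strip().lower()
def pvKey (n : String) : String := PySem.Str.lower (PySem.Str.strip n)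

-- inner body of the loop, for one axis: if key in cands: r = cands.index(key);
-- if best[axis] is None or r <= best[axis][0]: best[axis] = (r, name)
def pvAxisStep (cands : List String) (s : Option (Nat × String)) (n : String) : Option (Nat × String) :=
  match PySem.List.index? cands (pvKey n) with
  | none => s
  | some r =>
    match s with
    | none => some (r, n)
    | some (r0, _) => if r ≤ r0 then some (r, n) else s

-- one iteration of `for name in fieldnames` over the three axes
def pvStepB (s : Option (Nat × String) × Option (Nat × String) × Option (Nat × String)) (n : String) :
    Option (Nat × String) × Option (Nat × String) × Option (Nat × String) :=
  (pvAxisStep ["x", "acc_x", "ax"] s.1 n,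
   pvAxisStep ["y", "acc_y", "ay"] s.2.1 n,
   pvAxisStep ["z", "acc_z", "az"] s.2.2 n)

def resolve_columns_py_alt (fieldnames : List String) : Option String × Option String × Option String :=
  let best := fieldnames.foldl pvStepB (none, none, none)
  (best.1.map Prod.snd, best.2.1.map Prod.snd, best.2.2.map Prod.snd)

-- ===== PRECONDITION & SPEC =====
def Spec_resolve_columns_py (fieldnames : List String) (out : Option String × Option String × Option String) : Prop := out = resolve_columns_py_alt fieldnames
instance (fieldnames : List String) (out : Option String × Option String × Option String) : Decidable (Spec_resolve_columns_py fieldnames out) := by unfold Spec_resolve_columns_py; infer_instance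

-- ===== CLAIM (what is proved, stated in full; the proofs are below) =====
def Claim_equal_resolve_columns_py : Prop := ∀ (fieldnames : List String), Dom_resolve_columns_py fieldnames → Spec_resolve_columns_py fieldnames (resolve_columns_py fieldnames)

-- ===== LEMMAS AND PROOFS =====

-- last name of l whose stripped-lowered form equals c (the dict's last-wins value at key c)
def pvLastMatch (l : List String) (c : String) : Option String :=
  l.foldl (fun hit name => if pvKey name == c then some name else hit) none

-- first candidate (from index i on) that has a last match in l, with its absolute index
def pvFR (l : List String) : List String → Nat → Option (Nat × String)
  | [], _ => none
  | c :: cs, i =>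
    match pvLastMatch l c with
    | some m => some (i, m)
    | none => pvFR l cs (i + 1)

-- A's pick, reformulated as per-candidate last-match scans
def pvFind (l : List String) : List String → Option String
  | [] => none
  | c :: cs =>
    match pvLastMatch l c with
    | some m => some m
    | none => pvFind l cs

-- lookup in the insert-loop dict = last-match fold over the names
theorem pv_get_foldl_insert (fieldnames : List String) (d : PySem.Dict String String) (c : String) :
    (fieldnames.foldl (fun d name => d.insert (PySem.Str.lower (PySem.Str.strip name)) name) d).get? c
      = fieldnames.foldl
          (fun hit name => if pvKey name == c then some name else hit)
          (d.get? c) := by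
  induction fieldnames generalizing d with
  | nil => rfl
  | cons n rest ih =>
    rw [List.foldl_cons, List.foldl_cons, ih]
    have hstep : (d.insert (PySem.Str.lower (PySem.Str.strip n)) n).get? c
        = if pvKey n == c then some n else d.get? c := by
      rw [PySem.Dict.get?_insert]
      by_cases h : c = PySem.Str.lower (PySem.Str.strip n)
      · rw [if_pos h, if_pos (by rw [pvKey, h, beq_self_eq_true])]
      · rw [if_neg h, if_neg (by simp only [pvKey, beq_iff_eq]; exact fun hh => h hh.symm)]
    rw [hstep]

theorem pv_lowered_get (fieldnames : List String) (c : String) :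
    (pvLoweredA fieldnames).get? c = pvLastMatch fieldnames c := by
  have h := pv_get_foldl_insert fieldnames PySem.Dict.empty c
  rw [PySem.Dict.get?_empty] at h
  exact h

theorem pv_pick_eq_find (fieldnames : List String) (cands : List String) :
    pvPickA (pvLoweredA fieldnames) cands = pvFind fieldnames cands := by
  induction cands with
  | nil => rfl
  | cons c rest ih =>
    rw [pvPickA, pvFind, ih]
    rw [PySem.Dict.contains_eq_isSome_get?, pv_lowered_get]
    cases pvLastMatch fieldnames c
    · simp
    · simp

theorem pvLastMatch_nil (c : String) : pvLastMatch [] c = none := rfl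

theorem pvLastMatch_append (l : List String) (n c : String) :
    pvLastMatch (l ++ [n]) c = if pvKey n == c then some n else pvLastMatch l c := by
  simp [pvLastMatch, List.foldl_append]

theorem pvFR_nil : ∀ (cs : List String) (i : Nat), pvFR [] cs i = none := by
  intro cs
  induction cs with
  | nil => intro i; rfl
  | cons c cs ih => intro i; rw [pvFR, pvLastMatch_nil]; exact ih (i + 1)

theorem pvFR_ge (l : List String) :
    ∀ (cs : List String) (i j : Nat) (m : String), pvFR l cs i = some (j, m) → i ≤ j := by
  intro cs
  induction cs with
  | nil => intro i j m h; exact absurd h (by rw [pvFR]; exact fun hh => by cases hh)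
  | cons c cs ih =>
    intro i j m h
    rw [pvFR] at h
    cases hlm : pvLastMatch l c with
    | some m0 => rw [hlm] at h; cases h; exact le_refl _
    | none => rw [hlm] at h; exact Nat.le_of_succ_le (ih (i + 1) j m h)

theorem pvFR_append (l : List String) (n : String) :
    ∀ (cs : List String) (i : Nat),
      pvFR (l ++ [n]) cs i =
        match PySem.List.index? cs (pvKey n) with
        | none => pvFR l cs i
        | some r =>
          match pvFR l cs i with
          | none => some (i + r, n)
          | some (j, m) => if j < i + r then some (j, m) else some (i + r, n) := by
  intro cs
  induction cs with
  | nil =>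
    intro i
    rw [pvFR]
    have : PySem.List.index? ([] : List String) (pvKey n) = none := by
      simp [PySem.List.index?_eq_idxOf?]
    rw [this, pvFR]
  | cons c cs ih =>
    intro i
    by_cases hc : pvKey n = c
    · subst hc
      rw [PySem.List.index?_cons_self]
      rw [pvFR, pvLastMatch_append, if_pos (beq_self_eq_true _)]
      rw [pvFR]
      cases hfr : pvLastMatch l (pvKey n) with
      | none =>
        cases hfr2 : pvFR l cs (i + 1) with
        | none => simp
        | some jm =>
          obtain ⟨j, m⟩ := jm
          have hj := pvFR_ge l cs (i + 1) j m hfr2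
          simp
          exact fun h => absurd h (by omega)
      | some m =>
        simp
    · have hne : c ≠ pvKey n := fun h => hc (Eq.symm h)
      have hidx : PySem.List.index? (c :: cs) (pvKey n)
          = (PySem.List.index? cs (pvKey n)).map (· + 1) :=
        PySem.List.index?_cons_of_ne cs hne
      rw [hidx, pvFR, pvLastMatch_append,
        if_neg (by simp only [beq_iff_eq]; exact hc), pvFR]
      cases hlm : pvLastMatch l c with
      | some m =>
        cases hidx2 : PySem.List.index? cs (pvKey n) with
        | none => simp
        | some r =>
          have : i < i + (r + 1) := by omega
          simp [this]
      | none =>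
        rw [ih (i + 1)]
        cases hidx2 : PySem.List.index? cs (pvKey n) with
        | none => simp
        | some r =>
          have harith : (i + 1) + r = i + (r + 1) := by omega
          simp only [Option.map_some]
          rw [harith]
theorem pv_fold_axis (cands : List String) :
    ∀ (l : List String), l.foldl (pvAxisStep cands) none = pvFR l cands 0 := by
  intro l
  induction l using List.reverseRecOn with
  | nil => rw [List.foldl_nil, pvFR_nil]
  | append_singleton l n ih =>
    rw [List.foldl_append, List.foldl_cons, List.foldl_nil, ih, pvFR_append]
    cases hidx : PySem.List.index? cands (pvKey n) with
    | none => rw [pvAxisStep, hidx]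
    | some r =>
      rw [pvAxisStep, hidx]
      cases hfr : pvFR l cands 0 with
      | none => simp
      | some jm =>
        obtain ⟨j, m⟩ := jm
        by_cases hle : r ≤ j
        · simp only [hle, if_true, Nat.zero_add]
          rw [if_neg (by omega)]
        · simp only [hle, if_false, Nat.zero_add]
          rw [if_pos (by omega)]

theorem pvFR_map_snd (l : List String) :
    ∀ (cs : List String) (i : Nat), (pvFR l cs i).map Prod.snd = pvFind l cs := by
  intro cs
  induction cs with
  | nil => intro i; rfl
  | cons c cs ih =>
    intro i
    rw [pvFR, pvFind]
    cases pvLastMatch l c with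
    | some m => rfl
    | none => exact ih (i + 1)

theorem pv_fold_triple (l : List String) :
    ∀ (s : Option (Nat × String) × Option (Nat × String) × Option (Nat × String)),
      l.foldl pvStepB s =
        (l.foldl (pvAxisStep ["x", "acc_x", "ax"]) s.1,
         l.foldl (pvAxisStep ["y", "acc_y", "ay"]) s.2.1,
         l.foldl (pvAxisStep ["z", "acc_z", "az"]) s.2.2) := by
  induction l with
  | nil => intro s; rfl
  | cons n rest ih =>
    intro s
    rw [List.foldl_cons, ih, pvStepB]
    simp

theorem pv_axis_eq (fieldnames cands : List String) :
    (fieldnames.foldl (pvAxisStep cands) none).map Prod.snd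
      = pvPickA (pvLoweredA fieldnames) cands := by
  rw [pv_fold_axis, pvFR_map_snd, pv_pick_eq_find]

-- ===== VERDICT (by name: the statement is the Claim_ definition above) =====
theorem resolve_columns_py_spec : Claim_equal_resolve_columns_py := by
  intro fieldnames _
  show resolve_columns_py fieldnames = resolve_columns_py_alt fieldnames
  simp only [resolve_columns_py_alt]
  rw [pv_fold_triple fieldnames (none, none, none)]
  simp only [resolve_columns_py, pv_axis_eq]
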